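-- pv_equiv track=rewrite | github.com/VytCepas/projects | EDA_of_mental_health_in_tech_industry/project/utils.py | assess_and_convert_combined_into_single_value
-- ===== SOURCE A (Python) =====
-- from collections import Counter
--
-- def assess_and_convert_combined_into_single_value(
--     combined_value: str,
--     unclear_value: str = "Unsure",
-- ) -> str:
--     """
--     Convert a combined value string into a single value based on the most frequent occurrence.
--
--     Args:
--         combined_value (str): The combined value string.
--         unclear_value (str, optional): The value to return if there is no clear single value.
--
--     Returns:
--         str: The single value or the unclear value if there is no clear single value.
--     """
--     combined_value_list = combined_value.split("|")
--     standardized_value_count: dict[str, int] = Counter(combined_value_list)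
--
--     if combined_value == "":
--         return unclear_value
--
--     max_count = max(standardized_value_count.values())
--
--     max_values = [
--         value for value, count in standardized_value_count.items() if count == max_count
--     ]
--
--     return "".join(max_values) if len(max_values) == 1 else unclear_value
-- ===== SOURCE B (Python) =====
-- def assess_and_convert_combined_into_single_value(
--     combined_value: str,
--     unclear_value: str = "Unsure",
-- ) -> str:
--     if combined_value == "":
--         return unclear_value
--     ts = sorted(combined_value.split("|"))
--     n = len(ts)
--     best = 0
--     nbest = 0
--     bestval = ""
--     i = 0
--     while i < n:
--         j = i + 1
--         while j < n and ts[j] == ts[i]: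
--             j += 1
--         run = j - i
--         if run > best:
--             best, nbest, bestval = run, 1, ts[i]
--         elif run == best:
--             nbest += 1
--         i = j
--     return bestval if nbest == 1 else unclear_value
-- ===== Notes on version B (the rewrite author's own statement) =====
-- stated objective: alternative
-- what changed: Counter + max over counts + filter of the counter items is replaced by sorting the tokens and a single scan over the sorted list that measures run lengths, tracking the best run length, how many runs attain it, and the first value that owns it.
import Mathlib
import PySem

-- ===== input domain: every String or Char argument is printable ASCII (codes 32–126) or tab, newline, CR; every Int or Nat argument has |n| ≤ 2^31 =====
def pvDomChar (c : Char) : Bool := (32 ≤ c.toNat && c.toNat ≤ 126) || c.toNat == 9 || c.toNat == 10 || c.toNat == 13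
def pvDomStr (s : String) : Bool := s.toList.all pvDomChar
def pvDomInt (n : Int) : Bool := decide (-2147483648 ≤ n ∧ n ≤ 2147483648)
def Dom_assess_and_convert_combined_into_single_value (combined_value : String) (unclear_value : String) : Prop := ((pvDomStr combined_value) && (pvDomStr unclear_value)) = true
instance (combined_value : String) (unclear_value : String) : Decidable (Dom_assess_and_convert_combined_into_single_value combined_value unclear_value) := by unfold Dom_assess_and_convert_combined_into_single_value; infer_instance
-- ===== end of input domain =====

-- B replaces Counter + max + filter of counter items by sort-then-scan-runs: sort the
-- tokens and walk the sorted list once, tracking the best run length, how many runs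
-- attain it and the first value owning it (objective: alternative algorithm).

-- ===== PORT A =====
def assess_and_convert_combined_into_single_value (combined_value : String) (unclear_value : String) : String :=
  let combined_value_list := (PySem.Str.split? combined_value "|").getD []
  let standardized_value_count := PySem.Dict.counter combined_value_list
  if combined_value = "" then unclear_value
  else
    match PySem.List.max? standardized_value_count.values (fun x => x) with
    | none => unclear_value
    | some max_count =>
      let max_values := (standardized_value_count.items.filter (fun p => p.2 == max_count)).map Prod.fst
      if max_values.length = 1 then PySem.Str.join "" max_values else unclear_value

-- ===== PORT B =====
-- the while-loop of Source B, one run of equal adjacent tokens consumed per step (the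
-- inner `while j` scan over equal elements is the takeWhile/dropWhile split),
-- updating (best, nbest, bestval) exactly as Source B does
def pvScan : List String → Int → Int → String → Int × Int × String
  | [], best, nbest, bestval => (best, nbest, bestval)
  | x :: xs, best, nbest, bestval =>
    let run : Int := 1 + ((xs.takeWhile (fun y => y == x)).length : Int)
    let rest := xs.dropWhile (fun y => y == x)
    if best < run then pvScan rest run 1 x
    else if run = best then pvScan rest best (nbest + 1) bestval
    else pvScan rest best nbest bestval
termination_by s => s.length
decreasing_by all_goals
  exact Nat.lt_succ_of_le (List.Sublist.length_le (List.dropWhile_sublist _))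

def assess_and_convert_combined_into_single_value_alt (combined_value : String) (unclear_value : String) : String :=
  if combined_value = "" then unclear_value
  else
    let ts := PySem.List.sorted ((PySem.Str.split? combined_value "|").getD []) (fun t => t) false
    let r := pvScan ts 0 0 ""
    if r.2.1 = 1 then r.2.2 else unclear_value

-- values of a counter, as counts over the ordered distinct elements

-- ===== PRECONDITION & SPEC =====
def Spec_assess_and_convert_combined_into_single_value (combined_value : String) (unclear_value : String) (out : String) : Prop := out = assess_and_convert_combined_into_single_value_alt combined_value unclear_value
instance (combined_value : String) (unclear_value : String) (out : String) : Decidable (Spec_assess_and_convert_combined_into_single_value combined_value unclear_value out) := by unfold Spec_assess_and_convert_combined_into_single_value; infer_instance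

-- ===== CLAIM (what is proved, stated in full; the proofs are below) =====
def Claim_equal_assess_and_convert_combined_into_single_value : Prop := ∀ (combined_value : String) (unclear_value : String), Dom_assess_and_convert_combined_into_single_value combined_value unclear_value → Spec_assess_and_convert_combined_into_single_value combined_value unclear_value (assess_and_convert_combined_into_single_value combined_value unclear_value)

-- ===== LEMMAS AND PROOFS =====

-- run decomposition of a list (value, run length) and the per-run step of B's scan
def pvRuns : List String → List (String × Int)
  | [] => []
  | x :: xs =>
    (x, 1 + ((xs.takeWhile (fun y => y == x)).length : Int)) :: pvRuns (xs.dropWhile (fun y => y == x))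
termination_by s => s.length
decreasing_by
  exact Nat.lt_succ_of_le (List.Sublist.length_le (List.dropWhile_sublist _))

def pvStp (st : Int × Int × String) (p : String × Int) : Int × Int × String :=
  if st.1 < p.2 then (p.2, 1, p.1)
  else if p.2 = st.1 then (st.1, st.2.1 + 1, st.2.2) else st

-- B's scan is the fold of pvStp over the run decomposition
theorem pvScan_eq_foldl : ∀ (s : List String) (b n : Int) (v : String),
    pvScan s b n v = (pvRuns s).foldl pvStp (b, n, v) := by
  intro s
  induction s using pvRuns.induct with
  | case1 => intro b n v; simp [pvScan, pvRuns]
  | case2 x xs ih =>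
    intro b n v
    rw [pvScan, pvRuns, List.foldl_cons]
    simp only [pvStp]
    split_ifs with h1 h2 <;> exact ih _ _ _

-- in a sorted list, everything after the head's run is strictly greater
theorem pv_lt_of_dropWhile : ∀ (xs : List String) (x : String),
    (∀ y ∈ xs, x ≤ y) → xs.Pairwise (· ≤ ·) →
    ∀ y ∈ xs.dropWhile (fun y => y == x), x < y := by
  intro xs
  induction xs with
  | nil => intro x _ _ y hy; simp [List.dropWhile] at hy
  | cons a t ih =>
    intro x hle hpw y hy
    rw [List.dropWhile_cons] at hy
    by_cases hax : a = x
    · simp [hax] at hy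
      exact ih x (fun z hz => hle z (List.mem_cons_of_mem _ hz))
        (List.Pairwise.sublist (List.sublist_cons_self a t) hpw) y hy
    · simp [beq_iff_eq, hax] at hy
      have hxa : x < a := lt_of_le_of_ne (hle a List.mem_cons_self) (Ne.symm hax)
      rcases hy with rfl | hyt
      · exact hxa
      · exact lt_of_lt_of_le hxa ((List.pairwise_cons.mp hpw).1 y hyt)

-- runs of a sorted list: strictly increasing values carrying exact counts
theorem pvRuns_spec : ∀ (s : List String), s.Pairwise (· ≤ ·) →
    ((pvRuns s).map Prod.fst).Pairwise (· < ·) ∧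
    (∀ t, t ∈ (pvRuns s).map Prod.fst ↔ t ∈ s) ∧
    (∀ p ∈ pvRuns s, p.2 = (s.count p.1 : Int) ∧ 0 < p.2) := by
  intro s
  induction s using pvRuns.induct with
  | case1 => intro _; refine ⟨by simp [pvRuns], by simp [pvRuns], by simp [pvRuns]⟩
  | case2 x xs ih =>
    intro hpw
    obtain ⟨hx, hxs⟩ := List.pairwise_cons.mp hpw
    have hsplit : xs.takeWhile (fun y => y == x) ++ xs.dropWhile (fun y => y == x) = xs :=
      List.takeWhile_append_dropWhile
    have hpre : ∀ y ∈ xs.takeWhile (fun y => y == x), y = x := by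
      intro y hy
      have := List.mem_takeWhile_imp hy
      simpa [beq_iff_eq] using this
    have hrestpw : (xs.dropWhile (fun y => y == x)).Pairwise (· ≤ ·) :=
      List.Pairwise.sublist (List.dropWhile_sublist _) hxs
    have hlt : ∀ y ∈ xs.dropWhile (fun y => y == x), x < y :=
      pv_lt_of_dropWhile xs x hx hxs
    obtain ⟨ihpw, ihmem, ihcnt⟩ := ih hrestpw
    rw [pvRuns]
    refine ⟨?_, ?_, ?_⟩
    · rw [List.map_cons, List.pairwise_cons]
      exact ⟨fun t ht => hlt t ((ihmem t).mp ht), ihpw⟩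
    · intro t
      rw [List.map_cons]
      simp only [List.mem_cons]
      constructor
      · rintro (rfl | ht)
        · exact Or.inl rfl
        · right
          rw [← hsplit]
          exact List.mem_append_right _ ((ihmem t).mp ht)
      · rintro (rfl | ht)
        · exact Or.inl rfl
        · rw [← hsplit] at ht
          rcases List.mem_append.mp ht with hp | hr
        -- y in prefix → = x
          · exact Or.inl (hpre t hp)
          · exact Or.inr ((ihmem t).mpr hr)
    · intro p hp
      rcases List.mem_cons.mp hp with rfl | hp'
      · constructor
        · have h1 : (xs.takeWhile (fun y => y == x)).count x
              = (xs.takeWhile (fun y => y == x)).length := by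
            rw [List.count_eq_length]
            intro b hb; rw [hpre b hb]
          have h2 : (xs.dropWhile (fun y => y == x)).count x = 0 := by
            rw [List.count_eq_zero]
            intro hc
            exact absurd (hlt x hc) (lt_irrefl x)
          have hxc : xs.count x = (xs.takeWhile (fun y => y == x)).length := by
            conv_lhs => rw [← hsplit]
            rw [List.count_append, h1, h2]
            omega
          simp only [List.count_cons_self, hxc]
          push_cast
          ring
        · have : (0:Int) ≤ ((xs.takeWhile (fun y => y == x)).length : Int) := Int.natCast_nonneg _
          omega
      · obtain ⟨h1, h2⟩ := ihcnt p hp'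
        have hmem : p.1 ∈ xs.dropWhile (fun y => y == x) :=
          (ihmem p.1).mp (List.mem_map.mpr ⟨p, hp', rfl⟩)
        have hne : p.1 ≠ x := ne_of_gt (hlt p.1 hmem)
        constructor
        · rw [h1]
          congr 1
          have h0 : (xs.takeWhile (fun y => y == x)).count p.1 = 0 := by
            rw [List.count_eq_zero]
            intro hc
            exact hne (hpre _ hc)
          rw [List.count_cons]
          conv_rhs => rw [← hsplit]
          rw [List.count_append, h0]
          simp [Ne.symm hne]
        · exact h2

-- the fold of pvStp computes (max run length, #runs attaining it, first owner)
def pvMx (PL : List (String × Int)) : Int := PL.foldl (fun a p => max a p.2) 0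

theorem pvFold_spec : ∀ (PL : List (String × Int)), (∀ p ∈ PL, 0 < p.2) →
    PL.foldl pvStp (0, 0, "") =
      (pvMx PL, (((PL.filter (fun p => p.2 == pvMx PL)).length : Nat) : Int),
        (((PL.filter (fun p => p.2 == pvMx PL)).head?).map Prod.fst).getD "") := by
  intro PL
  induction PL using List.reverseRecOn with
  | nil => intro _; simp [pvMx]
  | append_singleton Q q ih =>
    intro hpos
    have hposQ : ∀ p ∈ Q, 0 < p.2 := fun p hp => hpos p (List.mem_append_left _ hp)
    have hposq : 0 < q.2 := hpos q (List.mem_append_right _ (List.mem_singleton_self q))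
    have hub : ∀ p ∈ Q, p.2 ≤ pvMx Q := (PySem.List.le_foldl_max_int Q (fun p => p.2) 0).2
    have hMx0 : (0:Int) ≤ pvMx Q := (PySem.List.le_foldl_max_int Q (fun p => p.2) 0).1
    have hMxapp : pvMx (Q ++ [q]) = max (pvMx Q) q.2 := by
      simp [pvMx, List.foldl_append]
    rw [List.foldl_append, ih hposQ, List.foldl_cons, List.foldl_nil, hMxapp]
    rcases lt_trichotomy (pvMx Q) q.2 with hlt | heq | hgt
    · -- new maximum
      have hmax : max (pvMx Q) q.2 = q.2 := max_eq_right (le_of_lt hlt)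
      have hQnil : Q.filter (fun p => p.2 == q.2) = [] := by
        rw [List.filter_eq_nil_iff]
        intro p hp
        simp only [beq_iff_eq]
        exact ne_of_lt (lt_of_le_of_lt (hub p hp) hlt)
      rw [hmax]
      simp only [pvStp, hlt, if_pos]
      rw [List.filter_append, hQnil]
      simp
    · -- tie with the current maximum
      have hmax : max (pvMx Q) q.2 = pvMx Q := by omega
      have hQne : Q.filter (fun p => p.2 == pvMx Q) ≠ [] := by
        have hmem : pvMx Q ∈ Q.map Prod.snd := by
          have hfm : pvMx Q = (Q.map Prod.snd).foldl max 0 := by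
            rw [List.foldl_map]; rfl
          rcases PySem.List.foldl_max_mem (Q.map Prod.snd) 0 with h0 | hm
          · exfalso; rw [hfm] at heq; omega
          · rw [hfm]; exact hm
        obtain ⟨p, hp, hps⟩ := List.mem_map.mp hmem
        intro hnil
        have hpf : p ∈ Q.filter (fun p => p.2 == pvMx Q) :=
          List.mem_filter.mpr ⟨hp, by simp [hps]⟩
        rw [hnil] at hpf
        exact absurd hpf (List.not_mem_nil)
      rw [hmax]
      simp only [pvStp]
      rw [if_neg (by omega), if_pos heq.symm]
      have hq1 : List.filter (fun p => p.2 == pvMx Q) [q] = [q] := by simp [heq]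
      rw [List.filter_append, hq1]
      obtain ⟨f0, F', hF⟩ := List.exists_cons_of_ne_nil hQne
      rw [hF]
      simp [List.length_append]
    · -- below the current maximum
      have hmax : max (pvMx Q) q.2 = pvMx Q := max_eq_left (le_of_lt hgt)
      rw [hmax, List.filter_append]
      have hqnil : [q].filter (fun p => p.2 == pvMx Q) = [] := by
        simp [ne_of_lt hgt]
      rw [hqnil, List.append_nil]
      simp only [pvStp]
      rw [if_neg (by omega), if_neg (by omega)]

-- values of a counter are the counts over the ordered distinct elements
theorem pv_counter_values (l : List String) :
    (PySem.Dict.counter l).values = (PySem.Set.ofList l).map (fun k => ((l.count k : Nat) : Int)) := by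
  have h : (PySem.Dict.counter l).values = ((PySem.Dict.counter l).items).map Prod.snd := rfl
  rw [h, PySem.Dict.items_counter, List.map_map]
  rfl

-- agreement on every non-empty input string
theorem pv_main (cv u : String) (hcv : cv ≠ "") :
    assess_and_convert_combined_into_single_value cv u
      = assess_and_convert_combined_into_single_value_alt cv u := by
  unfold assess_and_convert_combined_into_single_value
  unfold assess_and_convert_combined_into_single_value_alt
  rw [if_neg hcv, if_neg hcv]
  set toks := (PySem.Str.split? cv "|").getD [] with htoks
  rcases htk : toks with _ | ⟨x, xs⟩
  · -- degenerate (unreachable from Python): no tokens at all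
    have hv : (PySem.Dict.counter ([] : List String)).values = [] := by
      rw [pv_counter_values]; rfl
    rw [hv]
    have : PySem.List.max? ([] : List Int) (fun x => x) = none :=
      (PySem.List.max?_eq_none_iff _ _).mpr rfl
    rw [this]
    rw [show PySem.List.sorted ([] : List String) (fun t => t) false = [] from rfl]
    simp [pvScan]
  · -- main case: at least one token
    have hvals : (PySem.Dict.counter (x::xs)).values
        = (PySem.Set.ofList (x::xs)).map (fun k => (((x::xs).count k : Nat) : Int)) :=
      pv_counter_values _
    have hDne : PySem.Set.ofList (x::xs) ≠ [] := by
      intro h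
      have hx : x ∈ PySem.Set.ofList (x::xs) :=
        (PySem.Set.mem_ofList (x::xs) x).mpr List.mem_cons_self
      rw [h] at hx
      exact absurd hx (List.not_mem_nil)
    have hvne : (PySem.Dict.counter (x::xs)).values ≠ [] := by
      rw [hvals]; simpa using hDne
    obtain ⟨m, hm⟩ : ∃ m, PySem.List.max? (PySem.Dict.counter (x::xs)).values (fun x => x) = some m := by
      cases hmm : PySem.List.max? (PySem.Dict.counter (x::xs)).values (fun x => x) with
      | none => exact absurd ((PySem.List.max?_eq_none_iff _ _).mp hmm) hvne
      | some m => exact ⟨m, rfl⟩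
    rw [hm]
    have hmmem := PySem.List.max?_mem hm
    have hmub := PySem.List.max?_isMax hm
    have hperm : (PySem.List.sorted (x::xs) (fun t => t) false).Perm (x::xs) :=
      PySem.List.sorted_perm _ _ _
    have hpw : (PySem.List.sorted (x::xs) (fun t => t) false).Pairwise (· ≤ ·) :=
      PySem.List.sorted_pairwise (x::xs) (fun t => t)
    obtain ⟨hRpw, hRmem, hRcnt⟩ := pvRuns_spec _ hpw
    set ts := PySem.List.sorted (x::xs) (fun t => t) false with hts
    set PL := pvRuns ts with hPL
    set Ds := PL.map Prod.fst with hDs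
    have hDsnodup : Ds.Nodup := List.Pairwise.imp (fun h => ne_of_lt h) hRpw
    have hposPL : ∀ p ∈ PL, 0 < p.2 := fun p hp => (hRcnt p hp).2
    have hcnt_eq : ∀ (t : String), ts.count t = (x::xs).count t := fun t => hperm.count_eq t
    have hPL2 : Ds.map (fun t => (t, (((x::xs).count t : Nat) : Int))) = PL := by
      rw [hDs, List.map_map]
      conv_rhs => rw [← List.map_id PL]
      apply List.map_congr_left
      intro p hp
      obtain ⟨h1, _⟩ := hRcnt p hp
      show (p.1, (((x::xs).count p.1 : Nat) : Int)) = p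
      rw [← hcnt_eq, ← h1]
    have hpermD : (PySem.Set.ofList (x::xs)).Perm Ds :=
      (List.perm_ext_iff_of_nodup (PySem.Set.nodup_ofList _) hDsnodup).mpr
        (fun t => (PySem.Set.mem_ofList (x::xs) t).trans
          (((hRmem t).trans hperm.mem_iff).symm))
    have hvals_perm : ((PySem.Dict.counter (x::xs)).values).Perm (PL.map Prod.snd) := by
      rw [hvals, ← hPL2, List.map_map]
      exact hpermD.map _
    have hmPL : m ∈ PL.map Prod.snd := hvals_perm.mem_iff.mp hmmem
    have hubPL : ∀ y ∈ PL.map Prod.snd, y ≤ m := fun y hy => hmub y (hvals_perm.mem_iff.mpr hy)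
    have hMxub : ∀ p ∈ PL, p.2 ≤ pvMx PL := (PySem.List.le_foldl_max_int PL (fun p => p.2) 0).2
    have hmMx : m = pvMx PL := by
      have h1 : m ≤ pvMx PL := by
        obtain ⟨p, hp, rfl⟩ := List.mem_map.mp hmPL
        exact hMxub p hp
      have h2 : pvMx PL ≤ m := by
        have hfm : pvMx PL = (PL.map Prod.snd).foldl max 0 := by rw [List.foldl_map]; rfl
        rcases PySem.List.foldl_max_mem (PL.map Prod.snd) 0 with h0 | hmem2
        · have hz : pvMx PL = 0 := by rw [hfm]; exact h0
          obtain ⟨p, hp, hpm⟩ := List.mem_map.mp hmPL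
          have := hposPL p hp
          omega
        · exact hubPL _ (hfm ▸ hmem2)
      omega
    have hfilterA : ((PySem.Dict.counter (x::xs)).items.filter (fun p => p.2 == m)).map Prod.fst
        = (PySem.Set.ofList (x::xs)).filter (fun t => ((((x::xs).count t : Nat)) : Int) == m) := by
      rw [PySem.Dict.items_counter, List.filter_map, List.map_map]
      simp only [Function.comp_def]
      exact List.map_id _
    have hfilterB : PL.filter (fun p => p.2 == m)
        = (Ds.filter (fun t => (((x::xs).count t : Nat) : Int) == m)).map
            (fun t => (t, (((x::xs).count t : Nat) : Int))) := by
      rw [← hPL2, List.filter_map]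
      rfl
    have hWperm : ((PySem.Set.ofList (x::xs)).filter (fun t => ((((x::xs).count t : Nat)) : Int) == m)).Perm
        (Ds.filter (fun t => (((x::xs).count t : Nat) : Int) == m)) := hpermD.filter _
    simp only [pvScan_eq_foldl]
    rw [pvFold_spec PL hposPL]
    simp only [← hmMx, hfilterA, hfilterB]
    by_cases hlen : ((PySem.Set.ofList (x::xs)).filter
        (fun t => ((((x::xs).count t : Nat)) : Int) == m)).length = 1
    · obtain ⟨a, ha⟩ := List.length_eq_one_iff.mp hlen
      have h1 : List.Perm [a] (Ds.filter (fun t => (((x::xs).count t : Nat) : Int) == m)) := by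
        rw [← ha]; exact hWperm
      have hWB := List.singleton_perm.mp h1
      rw [ha, ← hWB]
      simp [PySem.Str.join, PySem.Chars.join, List.intercalate, String.ofList]
    · have hlen2 : (Ds.filter (fun t => (((x::xs).count t : Nat) : Int) == m)).length ≠ 1 := by
        rw [← hWperm.length_eq]; exact hlen
      rw [if_neg hlen, if_neg (by simp; omega)]

-- ===== VERDICT (by name: the statement is the Claim_ definition above) =====
theorem assess_and_convert_combined_into_single_value_spec : Claim_equal_assess_and_convert_combined_into_single_value := by
  intro combined_value unclear_value _
  unfold Spec_assess_and_convert_combined_into_single_value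
  by_cases h : combined_value = ""
  · simp [assess_and_convert_combined_into_single_value,
      assess_and_convert_combined_into_single_value_alt, h]
  · exact pv_main combined_value unclear_value h
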